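-- pv_equiv track=rewrite | github.com/Skurdox/pythontest | Ahah line break go brrrrr.py | get_rectangle_string
-- ===== SOURCE A (Python) =====
-- def get_rectangle_string(size):
--     rectangle_string = ""
--     for i in range(1, size + 1):
--         if i == 1 or i == size:
--             # First and last rows are full of * characters
--             rectangle_string += "*" * (2 * size - 1) + "\n"
--         else:
--             # Other rows have a * character at the beginning and end, and spaces in the middle
--             rectangle_string += "*" + " " * (2 * size - 3) + "*" + "\n"
--     return rectangle_string
-- ===== SOURCE B (Python) =====
-- def get_rectangle_string(size):
--     if size <= 0:
--         return ""
--     top = "*" * (2 * size - 1) + "\n"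
--     if size == 1:
--         return top
--     mid = "*" + " " * (2 * size - 3) + "*" + "\n"
--     return top + mid * (size - 2) + top
-- ===== Notes on version B (the rewrite author's own statement) =====
-- stated objective: simpler
-- what changed: Replaces the per-row loop with a closed-form concatenation: the two distinct row strings are built once and the body is assembled by string multiplication (top + mid repeated + top), with early returns for the degenerate sizes.
import Mathlib
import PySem

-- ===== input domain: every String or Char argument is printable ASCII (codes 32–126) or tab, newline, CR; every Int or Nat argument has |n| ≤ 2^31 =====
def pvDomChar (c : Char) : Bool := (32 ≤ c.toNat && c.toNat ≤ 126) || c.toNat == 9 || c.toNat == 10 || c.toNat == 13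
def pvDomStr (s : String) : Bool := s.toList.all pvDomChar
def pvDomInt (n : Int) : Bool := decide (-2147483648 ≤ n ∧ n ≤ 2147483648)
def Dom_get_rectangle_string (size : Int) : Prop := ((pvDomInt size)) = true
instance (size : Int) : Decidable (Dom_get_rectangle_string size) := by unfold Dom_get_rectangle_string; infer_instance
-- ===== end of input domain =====

-- B replaces A's per-row loop by a closed-form concatenation (top + mid*(size-2) + top) with
-- early returns for size ≤ 0 and size = 1; objective: simpler.

-- Python's  s * n  on strings (negative n gives ""); exact: join of n.toNat copies
def pvStrMul (s : String) (n : Int) : String := String.join (List.replicate n.toNat s)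

-- ===== PORT A =====
def get_rectangle_string (size : Int) : String :=
  (PySem.List.pyRange 1 (size + 1) 1).foldl
    (fun rectangle_string i =>
      if i == 1 || i == size then
        rectangle_string ++ (pvStrMul "*" (2 * size - 1) ++ "\n")
      else
        rectangle_string ++ ("*" ++ pvStrMul " " (2 * size - 3) ++ "*" ++ "\n")) ""

-- ===== PORT B =====
def get_rectangle_string_alt (size : Int) : String :=
  if size ≤ 0 then ""
  else
    let top := pvStrMul "*" (2 * size - 1) ++ "\n"
    if size == 1 then top
    else
      let mid := "*" ++ pvStrMul " " (2 * size - 3) ++ "*" ++ "\n"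
      top ++ pvStrMul mid (size - 2) ++ top

-- ===== PRECONDITION & SPEC =====
def Spec_get_rectangle_string (size : Int) (out : String) : Prop := out = get_rectangle_string_alt size
instance (size : Int) (out : String) : Decidable (Spec_get_rectangle_string size out) := by unfold Spec_get_rectangle_string; infer_instance

-- ===== CLAIM (what is proved, stated in full; the proofs are below) =====
def Claim_equal_get_rectangle_string : Prop := ∀ (size : Int), Dom_get_rectangle_string size → Spec_get_rectangle_string size (get_rectangle_string size)

-- ===== LEMMAS AND PROOFS =====

lemma str_foldl_shift (l : List String) (a : String) :
    l.foldl (fun r s => r ++ s) a = a ++ l.foldl (fun r s => r ++ s) "" := by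
  induction l generalizing a with
  | nil => simp
  | cons x t ih =>
    simp only [List.foldl_cons]
    rw [ih (a ++ x), ih ("" ++ x)]
    simp [String.append_assoc]

lemma join_replicate_succ (n : Nat) (s : String) :
    String.join (List.replicate (n + 1) s) = s ++ String.join (List.replicate n s) := by
  simp only [String.join, List.replicate, List.foldl_cons]
  rw [str_foldl_shift]
  simp

-- folding "append the same string s once per element" is appending join (replicate length s)
lemma foldl_const_append (l : List Int) (s acc : String) :
    l.foldl (fun a (_ : Int) => a ++ s) acc = acc ++ String.join (List.replicate l.length s) := by
  induction l generalizing acc with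
  | nil => simp [String.join]
  | cons x t ih =>
    simp only [List.foldl_cons, List.length_cons]
    rw [ih, join_replicate_succ]
    simp [String.append_assoc]

-- the middle rows of A's loop (2 ≤ i < size) all take the else branch
lemma foldl_mid (size : Int) (acc : String) (l : List Int)
    (hl : ∀ i ∈ l, 2 ≤ i ∧ i < size) :
    l.foldl
      (fun rectangle_string i =>
        if i == 1 || i == size then
          rectangle_string ++ (pvStrMul "*" (2 * size - 1) ++ "\n")
        else
          rectangle_string ++ ("*" ++ pvStrMul " " (2 * size - 3) ++ "*" ++ "\n")) acc
    = acc ++ String.join (List.replicate l.length ("*" ++ pvStrMul " " (2 * size - 3) ++ "*" ++ "\n")) := by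
  rw [← foldl_const_append l ("*" ++ pvStrMul " " (2 * size - 3) ++ "*" ++ "\n") acc]
  apply PySem.List.foldl_congr_mem
  intro a i hi
  have h := hl i hi
  have h1 : (i == 1) = false := by simp; omega
  have h2 : (i == size) = false := by simp; omega
  simp [h1, h2]

-- ===== VERDICT (by name: the statement is the Claim_ definition above) =====
theorem get_rectangle_string_spec : Claim_equal_get_rectangle_string := by
  intro size _
  unfold Spec_get_rectangle_string get_rectangle_string get_rectangle_string_alt
  by_cases h0 : size ≤ 0
  · rw [PySem.List.pyRange_one_eq_nil (by omega)]
    simp [h0]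
  · by_cases h1 : size = 1
    · subst h1
      rw [PySem.List.pyRange_one_cons (by omega), PySem.List.pyRange_one_eq_nil (by omega)]
      simp
    · have h2 : 2 ≤ size := by omega
      rw [PySem.List.pyRange_one_cons (show (1 : Int) < size + 1 by omega),
          show (1 : Int) + 1 = 2 from by norm_num,
          PySem.List.pyRange_one_append 2 size (size + 1) (by omega) (by omega),
          PySem.List.pyRange_one_singleton]
      simp only [List.foldl_cons, List.foldl_append, List.foldl_nil]
      rw [foldl_mid size _ _ (fun i hi => by
            rw [PySem.List.mem_pyRange_one] at hi; omega)]
      have hlen : (PySem.List.pyRange 2 size 1).length = (size - 2).toNat := by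
        rw [PySem.List.length_pyRange_one]
      have hsz : (size == 1) = false := by simp; omega
      have hsq : (size == size) = true := by simp
      simp only [hlen, hsz, hsq, if_neg h0, Bool.false_eq_true, if_false, Bool.or_true,
        beq_self_eq_true, if_true]
      simp [pvStrMul, String.append_assoc]
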